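-- pv_equiv track=rewrite | github.com/abdelrkb/graph_theory | graph_theory.py | puis
-- ===== SOURCE A (Python) =====
-- def puis(L,n):
--     """
--     étant donnés un langage L et un entier n renvoie le
--     langage L^n (sans doublons).
--     >>> puis(['aa','ab','ba','bb'],2)
--     ['aaaa', 'aaab', 'aaba', 'aabb', 'abaa', 'abab', 'abba', 'abbb', 'baaa', 'baab',
--     'baba', 'babb', 'bbaa', 'bbab', 'bbba', 'bbbb']
--     """
--     res = L[:]
--     for i in range(n-1):
--         temp = []
--         for mot1 in res:
--             for mot2 in L:
--                 concat = mot1 + mot2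
--                 if concat not in temp:
--                     temp.append(concat)
--         res = temp[:]
--     return res
-- ===== SOURCE B (Python) =====
-- def mul_dedup(X, Y):
--     """Concatenation product X.Y without duplicates (first-occurrence order)."""
--     seen = set()
--     out = []
--     for u in X:
--         for v in Y:
--             w = u + v
--             if w not in seen:
--                 seen.add(w)
--                 out.append(w)
--     return out
--
-- def puis(L, n):
--     # L^n by binary exponentiation over deduplicated languages
--     if n <= 1:
--         return L[:]
--     result = ['']
--     base = L
--     m = n
--     while m > 0:
--         if m % 2 == 1:
--             result = mul_dedup(result, base)
--         m = m // 2
--         if m > 0: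
--             base = mul_dedup(base, base)
--     return result
-- ===== Notes on version B (the rewrite author's own statement) =====
-- stated objective: alternative
-- what changed: B computes L^n by binary exponentiation over deduplicated languages (O(log n) set-deduplicated concatenation products) instead of A's n-1 incremental passes each deduplicating with a linear 'not in list' scan.
import Mathlib
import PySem

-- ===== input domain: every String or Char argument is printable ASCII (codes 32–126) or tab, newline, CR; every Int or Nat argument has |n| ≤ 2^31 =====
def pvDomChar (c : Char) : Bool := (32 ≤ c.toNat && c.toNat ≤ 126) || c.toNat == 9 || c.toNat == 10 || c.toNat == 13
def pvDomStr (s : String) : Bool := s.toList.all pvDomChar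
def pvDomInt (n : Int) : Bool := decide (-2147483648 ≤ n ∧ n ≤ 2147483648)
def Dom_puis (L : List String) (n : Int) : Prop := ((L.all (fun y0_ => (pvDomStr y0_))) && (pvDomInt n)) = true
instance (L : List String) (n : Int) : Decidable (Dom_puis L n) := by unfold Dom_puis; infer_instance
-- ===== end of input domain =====

-- B computes L^n by binary exponentiation over deduplicated languages (log n
-- set-deduplicated products) instead of A's n-1 incremental passes with a linear
-- 'not in list' dedup scan.

-- ===== PORT A =====
def puis (L : List String) (n : Int) : List String :=
  (PySem.List.pyRange 0 (n - 1) 1).foldl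
    (fun res _i =>
      let temp :=
        res.foldl (fun temp mot1 =>
          L.foldl (fun temp mot2 =>
            let concat := mot1 ++ mot2
            if concat ∈ temp then temp else temp ++ [concat]) temp) []
      temp) L

-- ===== PORT B =====
-- concatenation product X.Y without duplicates (first-occurrence order), seen-set guarded
def mulDedup (X Y : List String) : List String :=
  (X.foldl (fun (st : PySem.Set String × List String) u =>
      Y.foldl (fun (st : PySem.Set String × List String) v =>
        let w := u ++ v
        if PySem.Set.contains st.1 w then st else (PySem.Set.add st.1 w, st.2 ++ [w])) st)
    (PySem.Set.empty, [])).2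

-- the while-loop of B: result/base/m as in the Python
def powLoop (result base : List String) (m : Nat) : List String :=
  if m = 0 then result
  else powLoop (if m % 2 = 1 then mulDedup result base else result)
    (if m / 2 = 0 then base else mulDedup base base) (m / 2)
termination_by m
decreasing_by exact Nat.div_lt_self (Nat.pos_of_ne_zero (by assumption)) (by omega)

def puis_alt (L : List String) (n : Int) : List String :=
  if n ≤ 1 then L
  else powLoop [""] L n.toNat

-- ===== PRECONDITION & SPEC =====
def Spec_puis (L : List String) (n : Int) (out : List String) : Prop := out = puis_alt L n
instance (L : List String) (n : Int) (out : List String) : Decidable (Spec_puis L n out) := by unfold Spec_puis; infer_instance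

-- ===== CLAIM (what is proved, stated in full; the proofs are below) =====
def Claim_equal_puis : Prop := ∀ (L : List String) (n : Int), Dom_puis L n → Spec_puis L n (puis L n)

-- ===== LEMMAS AND PROOFS =====

-- first-occurrence dedup via filter (proof vehicle); fuel avoids well-founded recursion
def pdedupF : Nat → List String → List String
  | _, [] => []
  | 0, _ :: _ => []
  | N + 1, x :: xs => x :: pdedupF N (xs.filter (fun y => y ≠ x))

def pdedup (l : List String) : List String := pdedupF l.length l

theorem pdedupF_congr : ∀ (N M : Nat) (l : List String), l.length ≤ N → l.length ≤ M →
    pdedupF N l = pdedupF M l := by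
  intro N
  induction N with
  | zero =>
    intro M l h1 _
    have : l = [] := List.length_eq_zero_iff.mp (Nat.le_zero.mp h1)
    subst this; cases M <;> rfl
  | succ N ih =>
    intro M l h1 h2
    cases l with
    | nil => cases M <;> rfl
    | cons x xs =>
      cases M with
      | zero => exact absurd h2 (by simp)
      | succ M =>
        show x :: pdedupF N _ = x :: pdedupF M _
        have hf := List.length_filter_le (fun y => decide (y ≠ x)) xs
        simp at h1 h2
        rw [ih M _ (by omega) (by omega)]

theorem pdedup_nil : pdedup [] = [] := rfl

theorem pdedup_cons (x : String) (xs : List String) :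
    pdedup (x :: xs) = x :: pdedup (xs.filter (fun y => y ≠ x)) := by
  show x :: pdedupF xs.length (xs.filter (fun y => y ≠ x)) = _
  rw [pdedupF_congr xs.length (xs.filter (fun y => y ≠ x)).length _
    (List.length_filter_le _ _) (Nat.le_refl _)]
  rfl

theorem mem_pdedupF : ∀ (N : Nat) (l : List String) (c : String), c ∈ pdedupF N l → c ∈ l := by
  intro N
  induction N with
  | zero => intro l c h; cases l <;> simp [pdedupF] at h ⊢
  | succ N ih =>
    intro l c h
    cases l with
    | nil => simp [pdedupF] at h
    | cons x xs =>
      rcases List.mem_cons.mp h with h | h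
      · exact h ▸ List.mem_cons_self
      · exact List.mem_cons_of_mem _ (List.mem_of_mem_filter (ih _ c h))

theorem nodup_pdedupF : ∀ (N : Nat) (l : List String), (pdedupF N l).Nodup := by
  intro N
  induction N with
  | zero => intro l; cases l <;> simp [pdedupF]
  | succ N ih =>
    intro l
    cases l with
    | nil => simp [pdedupF]
    | cons x xs =>
      refine List.nodup_cons.mpr ⟨fun hmem => ?_, ih _⟩
      have := List.of_mem_filter (mem_pdedupF N _ x hmem)
      simp at this

theorem nodup_pdedup (l : List String) : (pdedup l).Nodup := nodup_pdedupF l.length l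

theorem pdedup_of_nodup : ∀ l : List String, l.Nodup → pdedup l = l := by
  intro l
  induction l with
  | nil => intro; rfl
  | cons x xs ih =>
    intro h
    rcases List.nodup_cons.mp h with ⟨hx, hxs⟩
    rw [pdedup_cons, List.filter_eq_self.mpr, ih hxs]
    intro a ha
    simp
    exact fun he => hx (he ▸ ha)

theorem pdedup_idem (l : List String) : pdedup (pdedup l) = pdedup l :=
  pdedup_of_nodup _ (nodup_pdedup l)

-- A's dedup-append accumulation characterised by pdedup
theorem foldadd_eq : ∀ (xs temp : List String),
    xs.foldl (fun t c => if c ∈ t then t else t ++ [c]) temp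
      = temp ++ pdedup (xs.filter (fun c => c ∉ temp)) := by
  intro xs
  induction xs with
  | nil => intro temp; simp [pdedup_nil]
  | cons x xs ih =>
    intro temp
    by_cases hx : x ∈ temp
    · simp only [List.foldl_cons, if_pos hx, List.filter_cons, decide_eq_true_eq]
      rw [ih temp]
      simp [hx]
    · simp only [List.foldl_cons, if_neg hx, List.filter_cons]
      rw [ih (temp ++ [x])]
      simp only [hx, not_false_eq_true, decide_true, if_pos]
      rw [pdedup_cons, List.filter_filter]
      simp only [List.append_assoc, List.cons_append, List.nil_append]
      congr 3
      apply List.filter_congr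
      intro a _
      by_cases h1 : a ∈ temp <;> by_cases h2 : a = x <;> simp [h1, h2]

-- the concatenation product, raw (all duplicates kept)
def lmul (X Y : List String) : List String := X.flatMap (fun u => Y.map (fun v => u ++ v))

theorem mul_map_assoc (w : String) (M : List String) : ∀ X : List String,
    lmul (X.map (fun v => w ++ v)) M = (lmul X M).map (fun v => w ++ v) := by
  intro X
  induction X with
  | nil => rfl
  | cons u X ih =>
    simp only [lmul, List.map_cons, List.flatMap_cons, List.map_append] at ih ⊢
    rw [ih]
    congr 1
    simp [List.map_map, Function.comp_def, String.append_assoc]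

theorem mul_assoc' (L X M : List String) : lmul (lmul L X) M = lmul L (lmul X M) := by
  induction L with
  | nil => rfl
  | cons w L ih =>
    show lmul (X.map (fun v => w ++ v) ++ lmul L X) M = _
    simp only [lmul, List.flatMap_append] at ih ⊢
    rw [show (X.map (fun v => w ++ v)).flatMap (fun u => M.map (fun v => u ++ v))
          = lmul (X.map (fun v => w ++ v)) M from rfl, mul_map_assoc, ih]
    rfl

theorem mul_one_left (Z : List String) : lmul [""] Z = Z := by
  simp [lmul]

-- towers of concatenations
def rawR (L : List String) : Nat → List String
  | 0 => L
  | k + 1 => lmul (rawR L k) L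

def rawL (L : List String) : Nat → List String
  | 0 => L
  | k + 1 => lmul L (rawL L k)

def raw0 (L : List String) : Nat → List String
  | 0 => [""]
  | k + 1 => lmul L (raw0 L k)

theorem rawL_mul (L : List String) : ∀ k, lmul (rawL L k) L = lmul L (rawL L k) := by
  intro k
  induction k with
  | zero => rfl
  | succ k ih =>
    show lmul (lmul L (rawL L k)) L = _
    rw [mul_assoc', ih]
    rfl

theorem rawR_eq_rawL (L : List String) : ∀ k, rawR L k = rawL L k := by
  intro k
  induction k with
  | zero => rfl
  | succ k ih =>
    show lmul (rawR L k) L = rawL L (k + 1)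
    rw [ih, rawL_mul]
    rfl

theorem raw0_succ_eq_rawL (L : List String) : ∀ k, raw0 L (k + 1) = rawL L k := by
  intro k
  induction k with
  | zero =>
    show lmul L [""] = L
    simp [lmul]
  | succ k ih =>
    show lmul L (raw0 L (k + 1)) = rawL L (k + 1)
    rw [ih]
    rfl

theorem raw0_add (L : List String) : ∀ a b, raw0 L (a + b) = lmul (raw0 L a) (raw0 L b) := by
  intro a
  induction a with
  | zero => intro b; simp [raw0, mul_one_left]
  | succ a ih =>
    intro b
    have h1 : a + 1 + b = (a + b) + 1 := by omega
    rw [h1]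
    show lmul L (raw0 L (a + b)) = lmul (lmul L (raw0 L a)) (raw0 L b)
    rw [ih, mul_assoc']

-- pdedup distributes over append, filtering the tail
theorem pdedup_append : ∀ (N : Nat) (a b : List String), a.length ≤ N →
    pdedup (a ++ b) = pdedup a ++ pdedup (b.filter (fun c => c ∉ a)) := by
  intro N
  induction N with
  | zero =>
    intro a b ha
    have : a = [] := List.length_eq_zero_iff.mp (Nat.le_zero.mp ha)
    subst this; simp [pdedup_nil]
  | succ N ih =>
    intro a b ha
    cases a with
    | nil => simp [pdedup_nil]
    | cons x a' =>
      rw [List.cons_append, pdedup_cons, List.filter_append,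
        ih (a'.filter (fun y => y ≠ x)) (b.filter (fun y => y ≠ x))
          (Nat.le_trans (List.length_filter_le _ a') (Nat.succ_le_succ_iff.mp ha)),
        pdedup_cons]
      simp only [List.cons_append, List.cons.injEq, true_and, List.filter_filter]
      congr 2
      apply List.filter_congr
      intro c _
      by_cases h2 : c = x <;> by_cases h1 : c ∈ a' <;> simp [h1, h2]

-- deleting an occurrence that has an earlier equal occurrence preserves pdedup
theorem pdedup_del (l1 l2 : List String) (a : String) (ha : a ∈ l1) :
    pdedup (l1 ++ a :: l2) = pdedup (l1 ++ l2) := by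
  rw [pdedup_append l1.length l1 _ (Nat.le_refl _),
      pdedup_append l1.length l1 _ (Nat.le_refl _)]
  congr 2
  simp [ha]

theorem flatMap_filter_ne (x : String) (g : String → List String) (hx : g x = []) :
    ∀ zs : List String, zs.flatMap g = (zs.filter (fun y => y ≠ x)).flatMap g := by
  intro zs
  induction zs with
  | nil => rfl
  | cons z zs ih =>
    by_cases hz : z = x
    · subst hz; simp [hx, ih]
    · simp [hz, ih]

-- dropping a dedup on the LEFT factor under a final dedup
theorem pdedup_flatMap_pdedup : ∀ (N : Nat) (X : List String), X.length ≤ N →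
    ∀ g : String → List String, pdedup ((pdedup X).flatMap g) = pdedup (X.flatMap g) := by
  intro N
  induction N with
  | zero =>
    intro X hX g
    have : X = [] := List.length_eq_zero_iff.mp (Nat.le_zero.mp hX)
    subst this; rfl
  | succ N ih =>
    intro X hX g
    cases X with
    | nil => rfl
    | cons x xs =>
      have hxs : (xs.filter (fun y => y ≠ x)).length ≤ N :=
        Nat.le_trans (List.length_filter_le _ xs) (Nat.succ_le_succ_iff.mp hX)
      rw [pdedup_cons]
      rw [show (x :: pdedup (xs.filter (fun y => y ≠ x))).flatMap g
            = g x ++ (pdedup (xs.filter (fun y => y ≠ x))).flatMap g from by simp]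
      rw [show (x :: xs).flatMap g = g x ++ xs.flatMap g from by simp]
      rw [pdedup_append ((g x).length) (g x) _ (Nat.le_refl _),
          pdedup_append ((g x).length) (g x) _ (Nat.le_refl _)]
      congr 1
      rw [List.filter_flatMap, List.filter_flatMap]
      set g2 : String → List String := fun y => (g y).filter (fun c => c ∉ g x) with hg2
      have hg2x : g2 x = [] := by
        simp [hg2, List.filter_eq_nil_iff]
      rw [ih _ hxs g2]
      exact (congrArg pdedup (flatMap_filter_ne x g2 hg2x xs)).symm

theorem pdedup_mul_left (X Y : List String) :
    pdedup (lmul (pdedup X) Y) = pdedup (lmul X Y) :=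
  pdedup_flatMap_pdedup X.length X (Nat.le_refl _) (fun u => Y.map (fun v => u ++ v))

-- deleting a duplicated element of the RIGHT factor preserves pdedup of any filtered product
theorem pdedup_mul_right_del (y1 y2 : List String) (a : String) (ha : a ∈ y1) :
    ∀ (X : List String) (p : String → Bool),
      pdedup ((lmul X (y1 ++ a :: y2)).filter p) = pdedup ((lmul X (y1 ++ y2)).filter p) := by
  intro X
  induction X with
  | nil => intro p; rfl
  | cons x xs ih =>
    intro p
    have hblock : ∀ Z : List String, lmul (x :: xs) Z = Z.map (fun v => x ++ v) ++ lmul xs Z := by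
      intro Z; rfl
    rw [hblock, hblock, List.filter_append, List.filter_append]
    rw [pdedup_append (((y1 ++ a :: y2).map (fun v => x ++ v)).filter p).length _ _ (Nat.le_refl _),
        pdedup_append (((y1 ++ y2).map (fun v => x ++ v)).filter p).length _ _ (Nat.le_refl _)]
    have hmaps : (y1 ++ a :: y2).map (fun v => x ++ v)
        = y1.map (fun v => x ++ v) ++ (x ++ a) :: y2.map (fun v => x ++ v) := by simp
    have hmaps' : (y1 ++ y2).map (fun v => x ++ v)
        = y1.map (fun v => x ++ v) ++ y2.map (fun v => x ++ v) := by simp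
    have hamem : (x ++ a) ∈ y1.map (fun v => x ++ v) := List.mem_map_of_mem ha
    -- the two head blocks have the same pdedup
    have hhead : pdedup (((y1 ++ a :: y2).map (fun v => x ++ v)).filter p)
        = pdedup (((y1 ++ y2).map (fun v => x ++ v)).filter p) := by
      rw [hmaps, hmaps', List.filter_append, List.filter_append, List.filter_cons]
      by_cases hp : p (x ++ a)
      · simp only [hp, if_pos]
        exact pdedup_del _ _ _ (List.mem_filter.mpr ⟨hamem, hp⟩)
      · simp [hp]
    -- and the same member set
    have hmemiff : ∀ c, (c ∈ ((y1 ++ a :: y2).map (fun v => x ++ v)).filter p)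
        ↔ (c ∈ ((y1 ++ y2).map (fun v => x ++ v)).filter p) := by
      intro c
      simp only [List.mem_filter, hmaps, hmaps', List.mem_append, List.mem_cons]
      constructor
      · rintro ⟨(h | h | h), hpc⟩
        · exact ⟨Or.inl h, hpc⟩
        · exact ⟨Or.inl (h ▸ hamem), hpc⟩
        · exact ⟨Or.inr h, hpc⟩
      · rintro ⟨(h | h), hpc⟩
        · exact ⟨Or.inl h, hpc⟩
        · exact ⟨Or.inr (Or.inr h), hpc⟩
    rw [hhead]
    congr 1
    -- tails: merge the two filters and use the IH at the merged predicate
    rw [List.filter_filter, List.filter_filter]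
    have hpred : (fun c => decide (c ∉ ((y1 ++ a :: y2).map (fun v => x ++ v)).filter p) && p c)
        = (fun c => decide (c ∉ ((y1 ++ y2).map (fun v => x ++ v)).filter p) && p c) := by
      funext c
      congr 1
      simp only [decide_eq_decide]
      exact not_congr (hmemiff c)
    rw [hpred]
    exact ih (fun c => decide (c ∉ ((y1 ++ y2).map (fun v => x ++ v)).filter p) && p c)

-- a list with a repeated element splits with the later copy exposed
theorem exists_earlier_dup : ∀ Y : List String, ¬ Y.Nodup →
    ∃ y1 a y2, Y = y1 ++ a :: y2 ∧ a ∈ y1 := by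
  intro Y
  induction Y with
  | nil => intro h; exact absurd List.nodup_nil h
  | cons y ys ih =>
    intro h
    by_cases hy : y ∈ ys
    · obtain ⟨s, t, hst⟩ := List.append_of_mem hy
      exact ⟨y :: s, y, t, by simp [hst], List.mem_cons_self⟩
    · have : ¬ ys.Nodup := fun hn => h (List.nodup_cons.mpr ⟨hy, hn⟩)
      obtain ⟨y1, a, y2, hsplit, hmem⟩ := ih this
      exact ⟨y :: y1, a, y2, by simp [hsplit], List.mem_cons_of_mem _ hmem⟩

-- dropping a dedup on the RIGHT factor under a final dedup
theorem pdedup_mul_right : ∀ (N : Nat) (Y : List String), Y.length ≤ N →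
    ∀ X : List String, pdedup (lmul X (pdedup Y)) = pdedup (lmul X Y) := by
  intro N
  induction N with
  | zero =>
    intro Y hY X
    have : Y = [] := List.length_eq_zero_iff.mp (Nat.le_zero.mp hY)
    subst this; rfl
  | succ N ih =>
    intro Y hY X
    by_cases hnd : Y.Nodup
    · rw [pdedup_of_nodup Y hnd]
    · obtain ⟨y1, a, y2, hsplit, hmem⟩ := exists_earlier_dup Y hnd
      have hlen : (y1 ++ y2).length ≤ N := by
        have := congrArg List.length hsplit
        simp at this ⊢
        omega
      have hYped : pdedup Y = pdedup (y1 ++ y2) := by rw [hsplit, pdedup_del _ _ _ hmem]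
      have hfull : ∀ Z : List String, (lmul X Z).filter (fun _ => true) = lmul X Z := by
        intro Z; exact List.filter_true _
      have hdel := pdedup_mul_right_del y1 y2 a hmem X (fun _ => true)
      rw [hfull, hfull] at hdel
      rw [hYped, ih _ hlen X, hsplit]
      exact hdel.symm

-- A's one pass equals pdedup of the raw cross product
theorem pass_eq (L res : List String) :
    (res.foldl (fun temp mot1 =>
        L.foldl (fun temp mot2 =>
          let concat := mot1 ++ mot2
          if concat ∈ temp then temp else temp ++ [concat]) temp) [])
      = pdedup (lmul res L) := by
  have inner : ∀ (mot1 : String) (t : List String),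
      L.foldl (fun temp mot2 =>
        let concat := mot1 ++ mot2
        if concat ∈ temp then temp else temp ++ [concat]) t
        = (L.map (fun v => mot1 ++ v)).foldl (fun t c => if c ∈ t then t else t ++ [c]) t := by
    intro mot1 t
    rw [List.foldl_map]
  have outer : ∀ (rs : List String) (t : List String),
      rs.foldl (fun temp mot1 =>
        L.foldl (fun temp mot2 =>
          let concat := mot1 ++ mot2
          if concat ∈ temp then temp else temp ++ [concat]) temp) t
        = (lmul rs L).foldl (fun t c => if c ∈ t then t else t ++ [c]) t := by
    intro rs
    induction rs with
    | nil => intro t; rfl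
    | cons r rs ih =>
      intro t
      simp only [List.foldl_cons, lmul, List.flatMap_cons, List.foldl_append]
      rw [inner r t, ih]
      rfl
  rw [outer, foldadd_eq]
  simp

-- the loop body of A's port, as a function
def passF (L : List String) (res : List String) : List String :=
  res.foldl (fun temp mot1 =>
    L.foldl (fun temp mot2 =>
      let concat := mot1 ++ mot2
      if concat ∈ temp then temp else temp ++ [concat]) temp) []

theorem foldl_range_ignore {α : Type} (f : α → α) :
    ∀ (j : Nat) (x : α), (List.range j).foldl (fun a _ => f a) x = f^[j] x := by
  intro j
  induction j with
  | zero => intro x; rfl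
  | succ j ih =>
    intro x
    rw [List.range_succ, List.foldl_append, ih, Function.iterate_succ_apply']
    rfl

theorem iter_passF (L : List String) : ∀ j : Nat,
    (passF L)^[j + 1] L = pdedup (rawR L (j + 1)) := by
  intro j
  induction j with
  | zero =>
    rw [Function.iterate_one]
    exact pass_eq L L
  | succ j ih =>
    rw [Function.iterate_succ_apply', ih]
    rw [show passF L (pdedup (rawR L (j + 1)))
          = pdedup (lmul (pdedup (rawR L (j + 1))) L) from pass_eq L _]
    rw [pdedup_mul_left]
    rfl

-- B's seen-set guarded product equals pdedup of the raw product
theorem mulDedup_eq (X Y : List String) : mulDedup X Y = pdedup (lmul X Y) := by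
  have flat : ∀ (rs : List String) (st : PySem.Set String × List String),
      rs.foldl (fun st u =>
        Y.foldl (fun (st : PySem.Set String × List String) v =>
          let w := u ++ v
          if PySem.Set.contains st.1 w then st else (PySem.Set.add st.1 w, st.2 ++ [w])) st) st
      = (lmul rs Y).foldl (fun (st : PySem.Set String × List String) w =>
          if PySem.Set.contains st.1 w then st else (PySem.Set.add st.1 w, st.2 ++ [w])) st := by
    intro rs
    induction rs with
    | nil => intro st; rfl
    | cons r rs ih =>
      intro st
      simp only [List.foldl_cons, lmul, List.flatMap_cons, List.foldl_append]
      rw [← List.foldl_map (f := fun v => r ++ v)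
        (g := fun (st : PySem.Set String × List String) w =>
          if PySem.Set.contains st.1 w then st else (PySem.Set.add st.1 w, st.2 ++ [w])), ih]
      rfl
  have pairfold : ∀ (zs : List String) (s : PySem.Set String) (t : List String),
      (∀ c, PySem.Set.contains s c = true ↔ c ∈ t) →
      (zs.foldl (fun (st : PySem.Set String × List String) w =>
          if PySem.Set.contains st.1 w then st else (PySem.Set.add st.1 w, st.2 ++ [w])) (s, t)).2
        = zs.foldl (fun t c => if c ∈ t then t else t ++ [c]) t := by
    intro zs
    induction zs with
    | nil => intro s t _; rfl
    | cons c zs ih =>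
      intro s t hinv
      simp only [List.foldl_cons]
      by_cases hc : c ∈ t
      · rw [if_pos ((hinv c).mpr hc), if_pos hc]
        exact ih s t hinv
      · rw [if_neg (fun h => hc ((hinv c).mp h)), if_neg hc]
        apply ih
        intro d
        have hcon' : PySem.Set.contains s c = false := by
          cases h : PySem.Set.contains s c
          · rfl
          · exact absurd ((hinv c).mp h) hc
        have hadd : PySem.Set.add s c = s ++ [c] := by
          unfold PySem.Set.add
          simp at hcon'
          simp [PySem.Set.contains, hcon']
        show PySem.Set.contains (PySem.Set.add s c) d = true ↔ d ∈ t ++ [c]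
        rw [hadd]
        have h2 : d ∈ s ↔ d ∈ t := by rw [← hinv d]; simp [PySem.Set.contains]
        have h3 : PySem.Set.contains (s ++ [c]) d = true ↔ d ∈ s ++ [c] := by
          simp [PySem.Set.contains]
        rw [h3, List.mem_append, List.mem_append]
        simp [h2]
  show (X.foldl _ (PySem.Set.empty, [])).2 = _
  rw [flat X (PySem.Set.empty, []), pairfold (lmul X Y) PySem.Set.empty []
    (by intro c; simp [PySem.Set.empty, PySem.Set.contains]), foldadd_eq]
  simp

-- the powLoop invariant: result is exactly L^r deduped, base is L^b up to dedup
theorem powLoop_eq (L : List String) : ∀ (N m : Nat), m ≤ N → ∀ (r b : Nat) (R Z : List String),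
    R = pdedup (raw0 L r) → pdedup Z = pdedup (raw0 L b) →
    powLoop R Z m = pdedup (raw0 L (r + b * m)) := by
  intro N
  induction N with
  | zero =>
    intro m hm r b R Z hR hZ
    have : m = 0 := Nat.le_zero.mp hm
    subst this
    rw [powLoop, if_pos rfl, hR]
    norm_num
  | succ N ih =>
    intro m hm r b R Z hR hZ
    by_cases h0 : m = 0
    · subst h0
      rw [powLoop, if_pos rfl, hR]
      norm_num
    · rw [powLoop, if_neg h0]
      have hmul : ∀ (U V : List String) (u v : Nat), pdedup U = pdedup (raw0 L u) →
          pdedup V = pdedup (raw0 L v) → mulDedup U V = pdedup (raw0 L (u + v)) := by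
        intro U V u v hU hV
        rw [mulDedup_eq,
            show pdedup (lmul U V) = pdedup (lmul (pdedup U) V) from (pdedup_mul_left U V).symm,
            hU, pdedup_mul_left,
            show pdedup (lmul (raw0 L u) V)
              = pdedup (lmul (raw0 L u) (pdedup V)) from (pdedup_mul_right V.length V (Nat.le_refl _) _).symm,
            hV, pdedup_mul_right (raw0 L v).length _ (Nat.le_refl _),
            ← raw0_add]
      have hle2 : m / 2 ≤ N := Nat.lt_succ_iff.mp (Nat.lt_of_lt_of_le
        (Nat.div_lt_self (Nat.pos_of_ne_zero h0) one_lt_two) hm)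
      have hR' : (if m % 2 = 1 then mulDedup R Z else R)
          = pdedup (raw0 L (r + b * (m % 2))) := by
        by_cases hodd : m % 2 = 1
        · rw [if_pos hodd, hmul R Z r b (by rw [hR, pdedup_idem]) hZ, hodd, Nat.mul_one]
        · have h2 : m % 2 = 0 := by omega
          rw [if_neg hodd, h2, Nat.mul_zero, Nat.add_zero, hR]
      by_cases hz : m / 2 = 0
      · rw [if_pos hz]
        rw [ih (m / 2) hle2 (r + b * (m % 2)) b _ _ hR' hZ]
        have hm1 : m = 1 := by omega
        have harith : r + b * (m % 2) + b * (m / 2) = r + b * m := by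
          rw [hm1]; ring
        rw [harith]
      · rw [if_neg hz]
        have hZ2 : pdedup (mulDedup Z Z) = pdedup (raw0 L (b + b)) := by
          rw [hmul Z Z b b hZ hZ, pdedup_idem]
        rw [ih (m / 2) hle2 (r + b * (m % 2)) (b + b) _ _ hR' hZ2]
        have h2m : 2 * (m / 2) + m % 2 = m := by omega
        have harith : r + b * (m % 2) + (b + b) * (m / 2) = r + b * m := by
          calc r + b * (m % 2) + (b + b) * (m / 2)
              = r + b * (2 * (m / 2) + m % 2) := by ring
            _ = r + b * m := by rw [h2m]
        rw [harith]

-- ===== VERDICT (by name: the statement is the Claim_ definition above) =====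
theorem puis_spec : Claim_equal_puis := by
  intro L n _hdom
  unfold Spec_puis puis puis_alt
  by_cases hle : n ≤ 1
  · rw [if_pos hle]
    rw [PySem.List.pyRange_one_eq_nil (by omega)]
    rfl
  · rw [if_neg hle]
    have hA : (PySem.List.pyRange 0 (n - 1) 1).foldl
        (fun res _i => passF L res) L = (passF L)^[(n - 1 - 0).toNat] L := by
      rw [PySem.List.pyRange_one, List.foldl_map, foldl_range_ignore]
    have hm : ∃ j : Nat, (n - 1 - 0).toNat = j + 1 ∧ n.toNat = j + 2 := by
      refine ⟨(n - 1).toNat - 1, by omega, by omega⟩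
    obtain ⟨j, hj, hn⟩ := hm
    have hB : powLoop [""] L n.toNat = pdedup (raw0 L n.toNat) := by
      rw [powLoop_eq L n.toNat n.toNat (Nat.le_refl _) 0 1 [""] L rfl
        (by rw [show raw0 L 1 = rawL L 0 from raw0_succ_eq_rawL L 0]; rfl)]
      norm_num
    calc (PySem.List.pyRange 0 (n - 1) 1).foldl (fun res _i => passF L res) L
        = (passF L)^[j + 1] L := by rw [hA, hj]
      _ = pdedup (rawR L (j + 1)) := iter_passF L j
      _ = pdedup (raw0 L n.toNat) := by
          rw [rawR_eq_rawL, ← raw0_succ_eq_rawL, hn]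
      _ = powLoop [""] L n.toNat := hB.symm
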